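-- pv_equiv track=rewrite | github.com/jrhubott/music-porter | server/core/utils.py | deduplicate_filenames
-- ===== SOURCE A (Python) =====
-- def deduplicate_filenames(filenames, scopes=None):
--     """Deduplicate a list of filenames, appending (2), (3) for collisions.
--
--     Args:
--         filenames: List of filename strings.
--         scopes: Optional list of scope keys (same length as filenames).
--             Files in different scopes won't collide.
--
--     Returns:
--         List of deduplicated filenames (same length/order as input).
--     """
--     seen = {}
--     result = []
--     for i, filename in enumerate(filenames):
--         scope = scopes[i] if scopes else ''
--         full_key = (scope, filename)
--         if full_key in seen:
--             seen[full_key] += 1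
--             stem, ext = (filename.rsplit('.', 1)
--                          if '.' in filename else (filename, ''))
--             suffix = f" ({seen[full_key]})"
--             result.append(
--                 f"{stem}{suffix}.{ext}" if ext else f"{stem}{suffix}")
--         else:
--             seen[full_key] = 1
--             result.append(filename)
--     return result
-- ===== SOURCE B (Python) =====
-- def _collide(filename, k):
--     stem, ext = (filename.rsplit('.', 1)
--                  if '.' in filename else (filename, ''))
--     suffix = f" ({k})"
--     return f"{stem}{suffix}.{ext}" if ext else f"{stem}{suffix}"
--
--
-- def deduplicate_filenames(filenames, scopes=None):
--     """Group positions by (scope, filename) first, then fill a preallocated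
--     result group by group: first occurrence keeps its name, the k-th gets ' (k)'."""
--     groups = {}
--     for i, filename in enumerate(filenames):
--         key = ((scopes[i] if scopes else ''), filename)
--         groups.setdefault(key, []).append(i)
--     result = [None] * len(filenames)
--     for (_scope, filename), positions in groups.items():
--         result[positions[0]] = filename
--         for k, pos in enumerate(positions[1:], 2):
--             result[pos] = _collide(filename, k)
--     return result
-- ===== Notes on version B (the rewrite author's own statement) =====
-- stated objective: alternative
-- what changed: Replaces the streaming single pass with a live collision counter dict by a two-phase group-then-fill decomposition: one pass buckets the positions of each (scope, filename) key, then a preallocated result is filled group by group (first position keeps the name, the k-th gets the ' (k)' suffix).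
import Mathlib
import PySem

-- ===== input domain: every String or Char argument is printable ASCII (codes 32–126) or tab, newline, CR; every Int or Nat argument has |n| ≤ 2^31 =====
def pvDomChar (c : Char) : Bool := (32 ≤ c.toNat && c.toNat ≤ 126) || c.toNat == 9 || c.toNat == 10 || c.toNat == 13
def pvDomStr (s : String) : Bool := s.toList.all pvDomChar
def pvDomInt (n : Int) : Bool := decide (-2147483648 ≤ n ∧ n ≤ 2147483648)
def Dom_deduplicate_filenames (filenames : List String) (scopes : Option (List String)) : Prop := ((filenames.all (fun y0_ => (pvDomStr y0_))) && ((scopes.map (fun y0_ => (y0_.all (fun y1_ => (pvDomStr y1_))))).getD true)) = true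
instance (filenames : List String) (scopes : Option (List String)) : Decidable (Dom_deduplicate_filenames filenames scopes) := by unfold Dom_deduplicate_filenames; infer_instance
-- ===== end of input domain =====

-- B replaces A's streaming pass with a live collision-counter dict by a two-phase
-- group-then-fill decomposition (bucket the positions of each (scope, filename) key,
-- then fill a preallocated result group by group); same cost, different structure.

-- ===== PORT A =====
-- scope = scopes[i] if scopes else ''   (truthiness: None and [] both fall back to '';
-- the .getD "" is unreachable under Pre_, which keeps every index in range)
def dd_scope (scopes : Option (List String)) (i : Int) : String :=
  match scopes with
  | none => ""
  | some s => if s.isEmpty then "" else (PySem.List.pyGet? s i).getD ""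

-- full_key = (scope, filename)
def dd_key (scopes : Option (List String)) (i : Int) (f : String) : String × String :=
  (dd_scope scopes i, f)

-- stem, ext = filename.rsplit('.', 1) if '.' in filename else (filename, '')
-- hand-written split at the LAST '.' (PySem has no rsplit); exact: reversing, the
-- chars before the first '.' of the reversal are the extension, the rest the stem
def dd_stemext (f : String) : String × String :=
  if PySem.Str.isIn "." f then
    let r := f.toList.reverse
    (String.ofList ((r.dropWhile (· ≠ '.')).drop 1).reverse,
     String.ofList (r.takeWhile (· ≠ '.')).reverse)
  else (f, "")

-- f"{stem}{suffix}.{ext}" if ext else f"{stem}{suffix}"  with  suffix = f" ({n})"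
def dd_collide (f : String) (n : Int) : String :=
  let se := dd_stemext f
  let suffix := " (" ++ PySem.Int.toStr n ++ ")"
  if se.2 = "" then se.1 ++ suffix else se.1 ++ suffix ++ "." ++ se.2

-- the body of A's single loop: state = (seen, result)
def stepA (scopes : Option (List String))
    (st : PySem.Dict (String × String) Int × List String) (p : Int × String) :
    PySem.Dict (String × String) Int × List String :=
  let key := dd_key scopes p.1 p.2
  match st.1.get? key with
  | some c => (st.1.insert key (c + 1), st.2 ++ [dd_collide p.2 (c + 1)])
  | none => (st.1.insert key 1, st.2 ++ [p.2])

def deduplicate_filenames (filenames : List String) (scopes : Option (List String)) : List String :=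
  ((PySem.List.enumerate filenames).foldl (stepA scopes) (PySem.Dict.empty, [])).2

-- ===== PORT B =====
-- result[i] = v  (B only ever assigns indices produced by enumerate, all in range,
-- where List.set is exact; Python would raise outside that range)
def pySet (xs : List String) (i : Int) (v : String) : List String :=
  if 0 ≤ i then xs.set i.toNat v else xs

-- first pass: groups.setdefault(key, []).append(i)
def ddGroups (filenames : List String) (scopes : Option (List String)) :
    PySem.Dict (String × String) (List Int) :=
  (PySem.List.enumerate filenames).foldl
    (fun d p => d.modify (dd_key scopes p.1 p.2) [] (fun l => l ++ [p.1])) PySem.Dict.empty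

-- second pass over groups.items(): fill the preallocated result (the [None]*n
-- placeholder is ported as "", every slot is overwritten); positions[0] is ported
-- as headD 0 (group position lists are never empty), positions[1:] as a slice
def deduplicate_filenames_alt (filenames : List String) (scopes : Option (List String)) : List String :=
  (ddGroups filenames scopes).items.foldl
    (fun result g =>
      let filename := g.1.2
      let positions := g.2
      let result := pySet result (positions.headD 0) filename
      (PySem.List.enumerate (PySem.List.slice positions (some 1) none) 2).foldl
        (fun r q => pySet r q.2 (dd_collide filename q.1)) result)
    (List.replicate filenames.length "")

-- ===== PRECONDITION & SPEC =====
-- A raises IndexError when scopes is a non-empty list shorter than filenames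
-- (scopes[i] out of range); Pre_ excludes exactly those inputs.
def Pre_deduplicate_filenames (filenames : List String) (scopes : Option (List String)) : Prop :=
  scopes.getD [] = [] ∨ filenames.length ≤ (scopes.getD []).length

instance (filenames : List String) (scopes : Option (List String)) : Decidable (Pre_deduplicate_filenames filenames scopes) := by
  unfold Pre_deduplicate_filenames; infer_instance

def pvWitness_deduplicate_filenames : List String × Option (List String) :=
  (["a.txt", "a.txt", "b"], some ["s", "s", "t"])

def Spec_deduplicate_filenames (filenames : List String) (scopes : Option (List String)) (out : List String) : Prop := out = deduplicate_filenames_alt filenames scopes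
instance (filenames : List String) (scopes : Option (List String)) (out : List String) : Decidable (Spec_deduplicate_filenames filenames scopes out) := by
  unfold Spec_deduplicate_filenames; infer_instance

-- ===== CLAIM (what is proved, stated in full; the proofs are below) =====
def Claim_equal_deduplicate_filenames : Prop := ∀ (filenames : List String) (scopes : Option (List String)), Dom_deduplicate_filenames filenames scopes → Pre_deduplicate_filenames filenames scopes → Spec_deduplicate_filenames filenames scopes (deduplicate_filenames filenames scopes)

-- ===== LEMMAS AND PROOFS =====

-- proof-side vocabulary
def ddKeyP (scopes : Option (List String)) (p : Int × String) : String × String :=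
  dd_key scopes p.1 p.2

def ddKeys (fs : List String) (scopes : Option (List String)) (s : Int) : List (String × String) :=
  (PySem.List.enumerate fs s).map (ddKeyP scopes)

def posOf (fs : List String) (scopes : Option (List String)) (s : Int) (k : String × String) : List Int :=
  ((PySem.List.enumerate fs s).filter (fun p => ddKeyP scopes p == k)).map (·.1)

def nameC (f : String) (c : Nat) : String :=
  if c = 0 then f else dd_collide f ((c : Int) + 1)

def auxA (scopes : Option (List String)) : List (Int × String) → List (String × String) → List String
  | [], _ => []
  | p :: t, h =>
      nameC p.2 (h.count (ddKeyP scopes p)) :: auxA scopes t (h ++ [ddKeyP scopes p])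

def wog (g : (String × String) × List Int) : List (Int × String) :=
  (g.2.headD 0, g.1.2) ::
    (PySem.List.enumerate (PySem.List.slice g.2 (some 1) none) 2).map
      (fun q => (q.2, dd_collide g.1.2 q.1))

def applyW (res : List String) (ws : List (Int × String)) : List String :=
  ws.foldl (fun r w => pySet r w.1 w.2) res

lemma A_loop (scopes : Option (List String)) :
    ∀ (l : List (Int × String)) (d : PySem.Dict (String × String) Int)
      (acc : List String) (h : List (String × String)),
      (∀ k, d.get? k = if h.count k = 0 then none else some ((h.count k : Int))) →
      (l.foldl (stepA scopes) (d, acc)).2 = acc ++ auxA scopes l h := by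
  intro l
  induction l with
  | nil => intro d acc h _; simp [auxA]
  | cons p t ih =>
      intro d acc h hd
      simp only [List.foldl_cons, auxA]
      have hkey := hd (ddKeyP scopes p)
      have hcnt : ∀ k : String × String,
          (h ++ [ddKeyP scopes p]).count k = h.count k + (if ddKeyP scopes p = k then 1 else 0) := by
        intro k; simp [List.count_append, List.count_singleton]
      have hinv : ∀ (v : Int), v = ((h.count (ddKeyP scopes p) : Int)) + 1 →
          ∀ k, (d.insert (ddKeyP scopes p) v).get? k =
            if (h ++ [ddKeyP scopes p]).count k = 0 then none
            else some (((h ++ [ddKeyP scopes p]).count k : Int)) := by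
        intro v hv k
        rw [PySem.Dict.get?_insert, hcnt k]
        by_cases hk : k = ddKeyP scopes p
        · rw [if_pos hk, if_pos hk.symm, if_neg (by omega), hv, hk]
          push_cast; ring_nf
        · have h0 : (if ddKeyP scopes p = k then (1:Nat) else 0) = 0 :=
            if_neg (fun he => hk he.symm)
          rw [if_neg hk, h0, Nat.add_zero, hd k]
      by_cases hc : h.count (ddKeyP scopes p) = 0
      · rw [hc, if_pos rfl] at hkey
        have hstep : stepA scopes (d, acc) p =
            (d.insert (ddKeyP scopes p) 1, acc ++ [p.2]) := by
          simp only [stepA, ddKeyP] at *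
          rw [hkey]
        rw [hstep, ih (d.insert (ddKeyP scopes p) 1) (acc ++ [p.2]) (h ++ [ddKeyP scopes p])
          (hinv 1 (by rw [hc]; simp))]
        simp [nameC, hc]
      · rw [if_neg hc] at hkey
        have hstep : stepA scopes (d, acc) p =
            (d.insert (ddKeyP scopes p) ((h.count (ddKeyP scopes p) : Int) + 1),
             acc ++ [dd_collide p.2 ((h.count (ddKeyP scopes p) : Int) + 1)]) := by
          simp only [stepA, ddKeyP] at *
          rw [hkey]
        rw [hstep, ih _ (acc ++ [dd_collide p.2 ((h.count (ddKeyP scopes p) : Int) + 1)])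
          (h ++ [ddKeyP scopes p]) (hinv _ rfl)]
        simp [nameC, hc]

lemma A_eq (fs : List String) (scopes : Option (List String)) :
    deduplicate_filenames fs scopes = auxA scopes (PySem.List.enumerate fs) [] := by
  rw [deduplicate_filenames, A_loop scopes (PySem.List.enumerate fs) PySem.Dict.empty [] []
    (by intro k; simp [PySem.Dict.get?_empty]), List.nil_append]

lemma auxA_length (scopes : Option (List String)) :
    ∀ (l : List (Int × String)) (h : List (String × String)),
      (auxA scopes l h).length = l.length := by
  intro l
  induction l with
  | nil => intro h; rfl
  | cons p t ih => intro h; simp [auxA, ih]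

lemma auxA_getElem? (scopes : Option (List String)) :
    ∀ (l : List (Int × String)) (h : List (String × String)) (i : Nat),
      (auxA scopes l h)[i]? = (l[i]?).map (fun p =>
        nameC p.2 ((h ++ (l.take i).map (ddKeyP scopes)).count (ddKeyP scopes p))) := by
  intro l
  induction l with
  | nil => intro h i; simp [auxA]
  | cons p t ih =>
      intro h i
      cases i with
      | zero => simp [auxA]
      | succ i =>
          simp only [auxA, List.getElem?_cons_succ, ih, List.take_succ_cons, List.map_cons]
          congr 1
          funext q
          congr 1
          simp [List.append_assoc]

lemma A_length (fs : List String) (scopes : Option (List String)) :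
    (deduplicate_filenames fs scopes).length = fs.length := by
  rw [A_eq, auxA_length, PySem.List.length_enumerate]

lemma A_getElem? (fs : List String) (scopes : Option (List String)) (i : Nat) (hi : i < fs.length) :
    (deduplicate_filenames fs scopes)[i]? =
      some (nameC fs[i]
        (((ddKeys fs scopes 0).take i).count (ddKeyP scopes ((i : Int), fs[i])))) := by
  rw [A_eq, auxA_getElem?, PySem.List.getElem?_enumerate, List.getElem?_eq_getElem hi]
  simp only [Option.map_some]
  unfold ddKeys
  rw [← List.map_take]
  norm_num

lemma groups_getD (fs : List String) (scopes : Option (List String)) (k : String × String) :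
    (ddGroups fs scopes).getD k [] = posOf fs scopes 0 k := by
  unfold ddGroups posOf
  rw [show (fun (d : PySem.Dict (String × String) (List Int)) (p : Int × String) =>
        d.modify (dd_key scopes p.1 p.2) [] (fun l => l ++ [p.1])) =
      (fun d p => d.modify (ddKeyP scopes p) [] (fun l => l ++ [p.1])) from rfl]
  rw [← List.foldl_map (f := fun p : Int × String => (ddKeyP scopes p, p.1))
      (g := fun (d : PySem.Dict (String × String) (List Int)) q =>
        d.modify q.1 [] (fun l => l ++ [q.2]))]
  rw [PySem.Dict.getD_foldl_modify_append]
  rw [List.filter_map, List.map_map]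
  simp [Function.comp_def]

lemma groups_keys (fs : List String) (scopes : Option (List String)) :
    (ddGroups fs scopes).keys = PySem.Set.ofList (ddKeys fs scopes 0) := by
  unfold ddGroups ddKeys
  rw [show (fun (d : PySem.Dict (String × String) (List Int)) (p : Int × String) =>
        d.modify (dd_key scopes p.1 p.2) [] (fun l => l ++ [p.1])) =
      (fun d p => d.modify (ddKeyP scopes p) [] ((fun (_ : PySem.Dict (String × String) (List Int)) (p : Int × String) (v : List Int) => v ++ [p.1]) d p)) from rfl]
  rw [PySem.Dict.keys_foldl_modify_key (key := ddKeyP scopes)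
    (f := fun _ p v => v ++ [p.1])]
  rw [show (PySem.Dict.empty : PySem.Dict (String × String) (List Int)).keys = [] from rfl]
  exact PySem.Set.update_empty _

lemma groups_keys_nodup (fs : List String) (scopes : Option (List String)) :
    (ddGroups fs scopes).keys.Nodup := by
  rw [groups_keys]; exact PySem.Set.nodup_ofList _

lemma groups_items (fs : List String) (scopes : Option (List String)) :
    (ddGroups fs scopes).items =
      (PySem.Set.ofList (ddKeys fs scopes 0)).map (fun k => (k, posOf fs scopes 0 k)) := by
  rw [PySem.Dict.items_eq_map_keys _ (groups_keys_nodup fs scopes) [], groups_keys]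
  exact List.map_congr_left (fun k _ => by rw [groups_getD])

lemma B_eq (fs : List String) (scopes : Option (List String)) :
    deduplicate_filenames_alt fs scopes =
      applyW (List.replicate fs.length "") ((ddGroups fs scopes).items.flatMap wog) := by
  unfold deduplicate_filenames_alt applyW wog
  rw [List.foldl_flatMap]
  congr 1
  funext result g
  simp only [List.foldl_cons, List.foldl_map]

lemma ddKeys_length (fs : List String) (scopes : Option (List String)) (s : Int) :
    (ddKeys fs scopes s).length = fs.length := by
  unfold ddKeys; rw [List.length_map, PySem.List.length_enumerate]

lemma ddKeys_getElem (fs : List String) (scopes : Option (List String)) (s : Int) (i : Nat)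
    (hi : i < fs.length) :
    (ddKeys fs scopes s)[i]? = some (ddKeyP scopes (s + (i : Int), fs[i])) := by
  unfold ddKeys
  rw [List.getElem?_map, PySem.List.getElem?_enumerate, List.getElem?_eq_getElem hi]
  rfl

lemma mem_posOf (fs : List String) (scopes : Option (List String)) (s : Int) (k : String × String)
    (x : Int) :
    x ∈ posOf fs scopes s k ↔
      ∃ (j : Nat), ∃ _h : j < fs.length, x = s + (j : Int) ∧ ddKeyP scopes (s + (j : Int), fs[j]) = k := by
  unfold posOf
  simp only [List.mem_map, List.mem_filter, PySem.List.mem_enumerate_iff]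
  constructor
  · rintro ⟨p, ⟨⟨j, hj, rfl⟩, hk⟩, rfl⟩
    exact ⟨j, hj, rfl, by simpa using hk⟩
  · rintro ⟨j, hj, rfl, hk⟩
    exact ⟨(s + (j : Int), fs[j]), ⟨⟨j, hj, rfl⟩, by simpa using hk⟩, rfl⟩

lemma posOf_sorted (fs : List String) (scopes : Option (List String)) (s : Int) (k : String × String) :
    (posOf fs scopes s k).Pairwise (· < ·) := by
  unfold posOf
  exact ((PySem.List.pairwise_lt_enumerate fs s).filter _).map _ (fun _ _ h => h)

lemma sorted_index_unique (l : List Int) (hs : l.Pairwise (· < ·)) (a b : Nat) (x : Int)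
    (ha : l[a]? = some x) (hb : l[b]? = some x) : a = b := by
  have hal : a < l.length := by
    by_contra h; rw [List.getElem?_eq_none (by omega)] at ha; cases ha
  have hbl : b < l.length := by
    by_contra h; rw [List.getElem?_eq_none (by omega)] at hb; cases hb
  rw [List.getElem?_eq_getElem hal] at ha
  rw [List.getElem?_eq_getElem hbl] at hb
  rcases Nat.lt_trichotomy a b with h | h | h
  · have := (List.pairwise_iff_getElem.mp hs) a b hal hbl h
    rw [Option.some_inj.mp ha, Option.some_inj.mp hb] at this
    omega
  · exact h
  · have := (List.pairwise_iff_getElem.mp hs) b a hbl hal h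
    rw [Option.some_inj.mp ha, Option.some_inj.mp hb] at this
    omega

lemma posOf_rank (fs : List String) (scopes : Option (List String)) :
    ∀ (s : Int) (k : String × String) (i : Nat) (hi : i < fs.length),
      ddKeyP scopes (s + (i : Int), fs[i]) = k →
      (posOf fs scopes s k)[((ddKeys fs scopes s).take i).count k]? = some (s + (i : Int)) := by
  induction fs with
  | nil => intro s k i hi; simp at hi
  | cons f t ih =>
      intro s k i hi hk
      have hposs : posOf (f :: t) scopes s k =
          (if ddKeyP scopes (s, f) == k then [s] else []) ++ posOf t scopes (s + 1) k := by
        unfold posOf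
        rw [show PySem.List.enumerate (f :: t) s = (s, f) :: PySem.List.enumerate t (s + 1) from
          PySem.List.enumerate_cons f t s]
        rw [List.filter_cons]
        split <;> simp
      have hkeys : ddKeys (f :: t) scopes s = ddKeyP scopes (s, f) :: ddKeys t scopes (s + 1) := by
        unfold ddKeys
        rw [show PySem.List.enumerate (f :: t) s = (s, f) :: PySem.List.enumerate t (s + 1) from
          PySem.List.enumerate_cons f t s, List.map_cons]
      cases i with
      | zero =>
          simp only [Nat.cast_zero, add_zero] at hk ⊢
          rw [hposs, hkeys, List.take_zero]
          simp only [List.count_nil]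
          rw [if_pos (by simpa using hk)]
          rfl
      | succ i =>
          have hi' : i < t.length := by simpa using hi
          have hk' : ddKeyP scopes ((s + 1) + (i : Int), t[i]) = k := by
            have : (s + 1) + (i : Int) = s + ((i + 1 : Nat) : Int) := by push_cast; ring
            rw [this]
            simpa using hk
          have := ih (s + 1) k i hi' hk'
          rw [hposs, hkeys, List.take_succ_cons, List.count_cons]
          by_cases hf : ddKeyP scopes (s, f) = k
          · rw [if_pos (by simpa using hf)]
            simp only [beq_iff_eq, hf]
            norm_num
            rw [this]; congr 1; omega
          · rw [if_neg (by simpa using hf)]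
            simp only [beq_iff_eq, hf]
            norm_num
            rw [this]; congr 1; omega

lemma wog_getElem? (k : String × String) (poss : List Int) (j : Nat) :
    (wog (k, poss))[j]? =
      match j with
      | 0 => some ((poss.headD 0), k.2)
      | j' + 1 => (poss[j' + 1]?).map (fun x => (x, dd_collide k.2 ((j' : Int) + 2))) := by
  cases j with
  | zero => rfl
  | succ j' =>
      simp only [wog, List.getElem?_cons_succ]
      rw [show PySem.List.slice poss (some 1) = poss.drop 1 from by
        rw [PySem.List.slice_from poss (by omega)]; rfl]
      simp only [List.getElem?_map,
        PySem.List.getElem?_enumerate, List.getElem?_drop, Option.map_map]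
      have : (1 : Nat) + j' = j' + 1 := by omega
      rw [this]
      cases poss[j' + 1]? <;> simp [Function.comp_def]
      congr 1
      omega

lemma pySet_length (r : List String) (i : Int) (v : String) : (pySet r i v).length = r.length := by
  unfold pySet; split <;> simp

lemma pySet_getElem?_ne (r : List String) (i : Int) (v : String) (j : Nat) (h : (j : Int) ≠ i) :
    (pySet r i v)[j]? = r[j]? := by
  unfold pySet; split
  · rw [List.getElem?_set_ne]; omega
  · rfl

lemma pySet_getElem?_self (r : List String) (j : Nat) (hj : j < r.length) (v : String) :
    (pySet r (j : Int) v)[j]? = some v := by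
  unfold pySet
  rw [if_pos (by omega)]
  simp [hj]

lemma applyW_length (res : List String) (ws : List (Int × String)) :
    (applyW res ws).length = res.length := by
  induction ws generalizing res with
  | nil => rfl
  | cons w t ih => simp only [applyW, List.foldl_cons] at *; rw [ih, pySet_length]

lemma applyW_getElem?_not_mem (res : List String) (ws : List (Int × String)) (j : Nat)
    (h : ∀ w ∈ ws, w.1 ≠ (j : Int)) : (applyW res ws)[j]? = res[j]? := by
  induction ws generalizing res with
  | nil => rfl
  | cons w t ih =>
      simp only [applyW, List.foldl_cons] at *
      rw [ih _ (fun w hw => h w (List.mem_cons_of_mem _ hw)),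
        pySet_getElem?_ne _ _ _ _ (fun he => h w (List.mem_cons_self) he.symm)]

lemma applyW_getElem?_unique (ws : List (Int × String)) (j : Nat) (v : String) :
    ∀ (res : List String), j < res.length → ((j : Int), v) ∈ ws →
      (∀ w ∈ ws, w.1 = (j : Int) → w.2 = v) →
      (applyW res ws)[j]? = some v := by
  induction ws with
  | nil => intro res _ hmem _; cases hmem
  | cons w t ih =>
      intro res hj hmem huniq
      simp only [applyW, List.foldl_cons]
      by_cases hw : w.1 = (j : Int)
      · have hv : w.2 = v := huniq w List.mem_cons_self hw
        by_cases hmem' : ((j : Int), v) ∈ t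
        · exact ih _ (by rw [pySet_length]; exact hj) hmem'
            (fun w' hw' => huniq w' (List.mem_cons_of_mem _ hw'))
        · have hnone : ∀ w' ∈ t, w'.1 ≠ (j : Int) := by
            intro w' hw' he
            exact hmem' (by
              have : w'.2 = v := huniq w' (List.mem_cons_of_mem _ hw') he
              rw [← he, ← this] at hmem' ⊢
              exact hw')
          have := applyW_getElem?_not_mem (pySet res w.1 w.2) t j hnone
          simp only [applyW] at this
          rw [this, hw, hv, pySet_getElem?_self _ _ hj]
      · have hmem' : ((j : Int), v) ∈ t := by
          rcases List.mem_cons.mp hmem with h1 | h2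
          · exact absurd (congrArg Prod.fst h1.symm) hw
          · exact h2
        exact ih _ (by rw [pySet_length]; exact hj) hmem'
          (fun w' hw' => huniq w' (List.mem_cons_of_mem _ hw'))

lemma headD_of_getElem? (l : List Int) (x : Int) (h : l[0]? = some x) : l.headD 0 = x := by
  cases l <;> simp_all

lemma getElem?_zero_of_ne_nil (l : List Int) (h : l ≠ []) : l[0]? = some (l.headD 0) := by
  cases l <;> simp_all

lemma B_length (fs : List String) (scopes : Option (List String)) :
    (deduplicate_filenames_alt fs scopes).length = fs.length := by
  rw [B_eq, applyW_length, List.length_replicate]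

lemma B_getElem? (fs : List String) (scopes : Option (List String)) (i : Nat) (hi : i < fs.length) :
    (deduplicate_filenames_alt fs scopes)[i]? =
      some (nameC fs[i]
        (((ddKeys fs scopes 0).take i).count (ddKeyP scopes ((i : Int), fs[i])))) := by
  set k := ddKeyP scopes ((i : Int), fs[i]) with hk
  set c := ((ddKeys fs scopes 0).take i).count k with hc
  set poss := posOf fs scopes 0 k with hposs
  set v := nameC fs[i] c with hv
  have hk2 : k.2 = fs[i] := rfl
  have hkey : ddKeyP scopes (0 + (i : Int), fs[i]) = k := by rw [hk]; norm_num
  have hrank : poss[c]? = some ((i : Int)) := by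
    have := posOf_rank fs scopes 0 k i hi hkey
    simpa using this
  have hkmem : k ∈ ddKeys fs scopes 0 := by
    rw [List.mem_iff_getElem?]
    exact ⟨i, by rw [ddKeys_getElem fs scopes 0 i hi]; rw [← hkey]⟩
  have hitem : (k, poss) ∈ (ddGroups fs scopes).items := by
    rw [groups_items]
    exact List.mem_map_of_mem ((PySem.Set.mem_ofList _ _).mpr hkmem)
  have hwmem : ((i : Int), v) ∈ wog (k, poss) := by
    rw [List.mem_iff_getElem?]
    refine ⟨c, ?_⟩
    rw [wog_getElem?]
    cases hcc : c with
    | zero =>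
        simp only
        rw [hv, hcc, headD_of_getElem? poss (i : Int) (by rw [← hcc]; exact hrank), hk2]
        rfl
    | succ c' =>
        simp only
        rw [← hcc, hrank]
        have hvv : v = dd_collide k.2 ((c' : Int) + 2) := by
          rw [hv, hk2, hcc]
          simp only [nameC]
          rw [if_neg (by omega)]
          congr 1
          try push_cast
          try ring
        simp only [Option.map_some, Option.some_inj]
        rw [hvv]
  have hws : ((i : Int), v) ∈ (ddGroups fs scopes).items.flatMap wog :=
    List.mem_flatMap.mpr ⟨(k, poss), hitem, hwmem⟩
  have huniq : ∀ w ∈ (ddGroups fs scopes).items.flatMap wog, w.1 = (i : Int) → w.2 = v := by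
    intro w hw hw1
    rcases List.mem_flatMap.mp hw with ⟨g, hg, hwg⟩
    rw [groups_items] at hg
    rcases List.mem_map.mp hg with ⟨k', hk'set, rfl⟩
    have hk'mem : k' ∈ ddKeys fs scopes 0 := (PySem.Set.mem_ofList _ _).mp hk'set
    obtain ⟨i0, hi0⟩ := List.mem_iff_getElem?.mp hk'mem
    have hi0l : i0 < fs.length := by
      have : i0 < (ddKeys fs scopes 0).length := by
        by_contra hcon
        rw [List.getElem?_eq_none (by omega)] at hi0
        cases hi0
      rwa [ddKeys_length] at this
    have hkey0 : ddKeyP scopes (0 + (i0 : Int), fs[i0]) = k' := by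
      rw [ddKeys_getElem fs scopes 0 i0 hi0l] at hi0
      exact Option.some_inj.mp hi0
    have hne : posOf fs scopes 0 k' ≠ [] := by
      intro hnil
      have := posOf_rank fs scopes 0 k' i0 hi0l hkey0
      rw [hnil] at this
      simp at this
    obtain ⟨j, hj⟩ := List.mem_iff_getElem?.mp hwg
    rw [wog_getElem?] at hj
    have hw1mem : w.1 ∈ posOf fs scopes 0 k' ∧
        (posOf fs scopes 0 k')[j]? = some w.1 := by
      cases j with
      | zero =>
          simp only at hj
          have hw1h : w.1 = (posOf fs scopes 0 k').headD 0 := by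
            rw [← Option.some_inj.mp hj]
          have h0 := getElem?_zero_of_ne_nil _ hne
          rw [← hw1h] at h0
          exact ⟨List.mem_iff_getElem?.mpr ⟨0, h0⟩, h0⟩
      | succ j' =>
          simp only at hj
          cases hpj : (posOf fs scopes 0 k')[j' + 1]? with
          | none => rw [hpj] at hj; cases hj
          | some x =>
              rw [hpj] at hj
              simp only [Option.map_some, Option.some_inj] at hj
              have hwx : w.1 = x := by rw [← hj]
              constructor
              · exact List.mem_iff_getElem?.mpr ⟨j' + 1, by rw [hpj]; exact congrArg some hwx.symm⟩
              · exact congrArg some hwx.symm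
    -- k' = k
    have hkk : k' = k := by
      have := hw1mem.1
      rw [hw1] at this
      rcases (mem_posOf fs scopes 0 k' (i : Int)).mp this with ⟨j0, hj0, hij, hkeyj⟩
      have hji : j0 = i := by omega
      subst hji
      rw [← hkeyj, ← hkey]
      try norm_num
    subst hkk
    -- j = c
    have hjc : j = c := by
      have h2 := hw1mem.2
      rw [hw1] at h2
      exact sorted_index_unique _ (posOf_sorted fs scopes 0 k) j c (i : Int) h2 hrank
    subst hjc
    -- compute w.2
    cases hcc : c with
    | zero =>
        rw [hcc] at hj
        simp only at hj
        have hw2 : w.2 = k.2 := (congrArg Prod.snd (Option.some_inj.mp hj)).symm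
        rw [hw2, hk2, hv, hcc]
        simp [nameC]
    | succ c' =>
        rw [hcc] at hj hrank
        simp only at hj
        rw [hrank] at hj
        simp only [Option.map_some, Option.some_inj] at hj
        have hw2 : w.2 = dd_collide k.2 ((c' : Int) + 2) := (congrArg Prod.snd hj).symm
        rw [hw2, hv, hk2, hcc]
        simp only [nameC]
        rw [if_neg (by omega)]
        congr 1
        try push_cast
        try ring
  rw [B_eq]
  exact applyW_getElem?_unique _ i v _ (by rw [List.length_replicate]; exact hi) hws huniq

-- ===== VERDICT (by name: the statement is the Claim_ definition above) =====
theorem deduplicate_filenames_spec : Claim_equal_deduplicate_filenames := by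
  intro fs scopes _ _
  unfold Spec_deduplicate_filenames
  apply List.ext_getElem?
  intro i
  by_cases hi : i < fs.length
  · rw [A_getElem? fs scopes i hi, B_getElem? fs scopes i hi]
  · rw [List.getElem?_eq_none, List.getElem?_eq_none]
    · rw [B_length]; omega
    · rw [A_length]; omega
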